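-- pv_equiv track=rewrite | github.com/TeamBreakerr/nonebot-plugin-resolver2 | nonebot_plugin_resolver2/parsers/weibo.py | mid2id
-- ===== SOURCE A (Python) =====
-- import math
--
-- ALPHABET = "0123456789abcdefghijklmnopqrstuvwxyzABCDEFGHIJKLMNOPQRSTUVWXYZ"
--
-- def base62_encode(number: int) -> str:
--     """将数字转换为 base62 编码"""
--     if number == 0:
--         return "0"
--
--     result = ""
--     while number > 0:
--         result = ALPHABET[number % 62] + result
--         number //= 62
--
--     return result
--
-- def mid2id(mid: str) -> str:
--     """将微博 mid 转换为 id"""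
--     mid = str(mid)[::-1]  # 反转输入字符串
--     size = math.ceil(len(mid) / 7)  # 计算每个块的大小
--     result = []
--
--     for i in range(size):
--         # 对每个块进行处理并反转
--         s = mid[i * 7 : (i + 1) * 7][::-1]
--         # 将字符串转为整数后进行 base62 编码
--         s = base62_encode(int(s))
--         # 如果不是最后一个块并且长度不足4位，进行左侧补零操作
--         if i < size - 1 and len(s) < 4:
--             s = "0" * (4 - len(s)) + s
--         result.append(s)
--
--     result.reverse()  # 反转结果数组
--     return "".join(result)  # 将结果数组连接成字符串
-- ===== SOURCE B (Python) =====
-- ALPHABET = "0123456789abcdefghijklmnopqrstuvwxyzABCDEFGHIJKLMNOPQRSTUVWXYZ"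
--
-- def base62_encode(number: int) -> str:
--     if number == 0:
--         return "0"
--     result = ""
--     while number > 0:
--         result = ALPHABET[number % 62] + result
--         number //= 62
--     return result
--
-- def mid2id(mid: str) -> str:
--     # recursive: encode the last 7 digits, recurse on the rest; no reversals, no lists
--     s = str(mid)
--     if len(s) <= 7:
--         return base62_encode(int(s))
--     cut = len(s) - 7
--     enc = base62_encode(int(s[cut:]))
--     return mid2id(s[:cut]) + "0" * (4 - len(enc)) + enc
-- ===== Notes on version B (the rewrite author's own statement) =====
-- stated objective: simpler
-- what changed: B is a direct recursion on the string (encode the last 7 digits, recurse on the remaining prefix, left-pad with an unconditional zero-fill to width 4), replacing A's whole-string reverse, slice-and-reverse chunk loop, result list and final list reverse.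
-- outside the precondition, e.g. on mid2id(''): A returns '', B raises ValueError
import Mathlib
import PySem

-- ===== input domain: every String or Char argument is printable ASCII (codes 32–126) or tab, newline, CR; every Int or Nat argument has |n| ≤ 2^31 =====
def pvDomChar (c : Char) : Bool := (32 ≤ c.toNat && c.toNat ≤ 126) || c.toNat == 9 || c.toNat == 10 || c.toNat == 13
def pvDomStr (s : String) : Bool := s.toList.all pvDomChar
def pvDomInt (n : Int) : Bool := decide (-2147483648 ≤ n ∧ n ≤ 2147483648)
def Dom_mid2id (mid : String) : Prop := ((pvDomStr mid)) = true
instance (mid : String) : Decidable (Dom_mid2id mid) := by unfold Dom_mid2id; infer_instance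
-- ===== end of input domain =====

-- B replaces A's reverse/slice/reverse loop, result list and final reverse by a direct
-- recursion on the string (encode the last 7 digits, recurse on the prefix); objective: simpler.

-- ===== PORT A =====
def pvAlphabet : List Char := "0123456789abcdefghijklmnopqrstuvwxyzABCDEFGHIJKLMNOPQRSTUVWXYZ".toList

-- while number > 0: result = ALPHABET[number % 62] + result; number //= 62
def base62Go (number : Int) (result : List Char) : List Char :=
  if 0 < number then
    base62Go (PySem.Int.floordiv number 62)
      (((PySem.List.pyGet? pvAlphabet (PySem.Int.mod number 62)).getD '0') :: result)
  else result
termination_by number.toNat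
decreasing_by
  have h1 : PySem.Int.floordiv number 62 = number / 62 := by
    simp [PySem.Int.floordiv, Int.fdiv_eq_ediv]
  omega

def base62_encode (number : Int) : List Char :=
  if number = 0 then ['0'] else base62Go number []

-- the body of A's for-loop over range(size): chunk, reverse, int(), base62, conditional pad
def midChunkA (mid' : List Char) (size i : Nat) : List Char :=
  let s := (PySem.List.slice mid' (some ((i * 7 : Nat) : Int)) (some (((i + 1) * 7 : Nat) : Int))).reverse
  let s := base62_encode ((PySem.Int.ofChars? s).getD 0)
  if i < size - 1 ∧ s.length < 4 then List.replicate (4 - s.length) '0' ++ s else s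

def mid2id (mid : String) : String :=
  let mid' := mid.toList.reverse
  let size := (mid'.length + 6) / 7  -- math.ceil(len(mid)/7), exact for Nat lengths
  let result := (List.range size).foldl (fun result i => result ++ [midChunkA mid' size i]) []
  String.ofList (result.reverse.flatten)

-- ===== PORT B =====
-- if len(s) <= 7: return base62_encode(int(s));
-- cut = len(s)-7; enc = base62_encode(int(s[cut:])); return mid2id(s[:cut]) + "0"*(4-len(enc)) + enc
def altRec (s : List Char) : List Char :=
  if s.length ≤ 7 then base62_encode ((PySem.Int.ofChars? s).getD 0)
  else
    let cut := s.length - 7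
    let enc := base62_encode ((PySem.Int.ofChars? (PySem.List.slice s (some (cut : Int)) none)).getD 0)
    altRec (PySem.List.slice s none (some (cut : Int))) ++ (List.replicate (4 - enc.length) '0' ++ enc)
termination_by s.length
decreasing_by
  rw [PySem.List.slice_to_natCast]
  simp only [List.length_take]
  omega

def mid2id_alt (mid : String) : String := String.ofList (altRec mid.toList)

-- ===== PRECONDITION & SPEC =====
-- Pre_ excludes the empty string, on which A returns "" (its loop runs zero times) while B's
-- int('') raises ValueError, and the strings on which Python's int() raises ValueError on some
-- 7-char group of mid counted from the right (both programs raise there).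
def Pre_mid2id (mid : String) : Prop :=
  mid.toList ≠ [] ∧
  ∀ i ∈ List.range ((mid.toList.length + 6) / 7),
    (PySem.Int.ofChars?
      ((mid.toList.take (mid.toList.length - i * 7)).drop (mid.toList.length - i * 7 - 7))).isSome = true
instance (mid : String) : Decidable (Pre_mid2id mid) := by unfold Pre_mid2id; infer_instance
def pvWitness_mid2id : String := "1234567890"

def Spec_mid2id (mid : String) (out : String) : Prop := out = mid2id_alt mid
instance (mid : String) (out : String) : Decidable (Spec_mid2id mid out) := by unfold Spec_mid2id; infer_instance

-- ===== CLAIM (what is proved, stated in full; the proofs are below) =====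
def Claim_equal_mid2id : Prop := ∀ (mid : String), Dom_mid2id mid → Pre_mid2id mid → Spec_mid2id mid (mid2id mid)

-- ===== LEMMAS AND PROOFS =====

-- A's chunk i (reverse, slice, reverse) is the i-th 7-group from the right
lemma chunkA_eq (l : List Char) (i : Nat) :
    (PySem.List.slice l.reverse (some ((i * 7 : Nat) : Int)) (some (((i + 1) * 7 : Nat) : Int))).reverse
      = (l.take (l.length - i * 7)).drop (l.length - i * 7 - 7) := by
  rw [PySem.List.slice_natCast]
  have h7 : (i + 1) * 7 - i * 7 = 7 := by omega
  rw [h7, List.drop_reverse, List.take_reverse, List.reverse_reverse]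
  congr 1
  simp [List.length_take]

-- chunk i+1 of l is chunk i of l with its last 7-group removed
lemma midChunkA_succ (l : List Char) (k j : Nat) :
    midChunkA l.reverse (k + 1) (j + 1) = midChunkA (l.take (l.length - 7)).reverse k j := by
  unfold midChunkA
  have hrev : (l.take (l.length - 7)).reverse = l.reverse.drop 7 := (List.drop_reverse ..).symm
  rw [hrev, PySem.List.slice_natCast, PySem.List.slice_natCast, List.drop_drop]
  have e1 : 7 + j * 7 = (j + 1) * 7 := by ring
  have e2 : (j + 1) * 7 - j * 7 = 7 := by omega
  have e3 : (j + 1 + 1) * 7 - (j + 1) * 7 = 7 := by omega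
  rw [e1, e2, e3]
  simp only [show (j + 1 < k + 1 - 1) ↔ (j < k - 1) from by omega]

-- main: A's reversed-and-flattened chunk list is B's recursion
lemma pv_main (n : Nat) : ∀ l : List Char, l.length = n → l ≠ [] →
    ((List.range ((n + 6) / 7)).map (midChunkA l.reverse ((n + 6) / 7))).reverse.flatten
      = altRec l := by
  induction n using Nat.strong_induction_on with
  | _ n ih =>
    intro l hl hne
    have h0 : n ≠ 0 := by
      intro h; exact hne (List.eq_nil_of_length_eq_zero (h ▸ hl))
    by_cases h7 : n ≤ 7
    · have hs : (n + 6) / 7 = 1 := by omega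
      rw [hs]
      simp only [List.range_one, List.map_cons, List.map_nil, List.reverse_cons,
        List.reverse_nil, List.nil_append, List.flatten_cons, List.flatten_nil, List.append_nil]
      rw [altRec, if_pos (hl ▸ h7)]
      simp only [midChunkA, chunkA_eq]
      simp only [Nat.zero_mul, Nat.sub_zero, hl]
      have hstart : n - 7 = 0 := by omega
      rw [hstart]
      have htn : List.take n l = l := hl ▸ List.take_length
      simp [htn]
    · -- 7 < n
      have h7' : 7 < n := by omega
      have hs : (n + 6) / 7 = ((n - 7) + 6) / 7 + 1 := by omega
      have hsz1 : 1 ≤ ((n - 7) + 6) / 7 := by omega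
      rw [hs, List.range_succ_eq_map]
      simp only [List.map_cons, List.map_map, List.reverse_cons, List.flatten_append,
        List.flatten_cons, List.flatten_nil, List.append_nil]
      have hmap : (List.range ((n - 7 + 6) / 7)).map (midChunkA l.reverse ((n - 7 + 6) / 7 + 1) ∘ Nat.succ)
          = (List.range ((n - 7 + 6) / 7)).map (midChunkA (l.take (n - 7)).reverse ((n - 7 + 6) / 7)) := by
        apply List.map_congr_left
        intro j hj
        have := midChunkA_succ l ((n - 7 + 6) / 7) j
        rw [hl] at this
        simpa [Nat.succ_eq_add_one] using this
      rw [hmap]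
      have hlen' : (l.take (n - 7)).length = n - 7 := by
        simp [hl]
      have hne' : l.take (n - 7) ≠ [] := by
        intro h
        have := congrArg List.length h
        rw [hlen'] at this
        simp at this
        omega
      rw [ih (n - 7) (by omega) (l.take (n - 7)) hlen' hne']
      -- B side
      conv_rhs => rw [altRec, if_neg (by rw [hl]; omega)]
      rw [hl]
      simp only [PySem.List.slice_to_natCast, PySem.List.slice_from_natCast]
      congr 1
      -- A's bottom chunk (i = 0), with its conditional pad, is B's padded enc
      simp only [midChunkA, chunkA_eq]
      simp only [Nat.zero_mul, Nat.sub_zero, hl]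
      have htn : List.take n l = l := hl ▸ List.take_length
      rw [htn]
      have hpadA : (0 < (n - 7 + 6) / 7 + 1 - 1) := by omega
      generalize base62_encode ((PySem.Int.ofChars? (l.drop (n - 7))).getD 0) = enc
      by_cases h4 : enc.length < 4
      · rw [if_pos ⟨hpadA, h4⟩]
      · rw [if_neg (fun h => h4 h.2)]
        have h40 : 4 - enc.length = 0 := by omega
        simp [h40]

-- ===== VERDICT (by name: the statement is the Claim_ definition above) =====
theorem mid2id_spec : Claim_equal_mid2id := by
  intro mid _ hpre
  simp only [Spec_mid2id, mid2id, mid2id_alt]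
  rw [PySem.List.foldl_append_singleton_eq_map]
  simp only [List.nil_append, List.length_reverse]
  rw [pv_main mid.toList.length mid.toList rfl hpre.1]
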